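-- pv_equiv track=rewrite | github.com/ChandanCoderck123/FACEANALYSISV1 | age_gender.py | get_age_range
-- ===== SOURCE A (Python) =====
-- def get_age_range(age: int) -> str:
--     if age < 18:
--         return "Below 18"  # Handle underage separately
--     for start in range(18, 80, 3):  # Iterate over age buckets from 18 to 80 in steps of 3
--         end = start + 2
--         if start <= age <= end:  # Check if the age falls within the current bucket
--             return f"{start}-{end}"  # Return the matched age bucket
--     return "80+"  # Handle senior age category separately
-- ===== SOURCE B (Python) =====
-- def get_age_range(age: int) -> str:
--     if age < 18:
--         return "Below 18"
--     if age > 80: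
--         return "80+"
--     start = 18 + ((age - 18) // 3) * 3
--     return f"{start}-{start + 2}"
-- ===== Notes on version B (the rewrite author's own statement) =====
-- stated objective: simpler
-- what changed: Replaced the linear scan over range(18,80,3) with a direct closed-form bucket computation start = 18 + ((age-18)//3)*3 plus an explicit age > 80 guard.
import Mathlib
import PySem

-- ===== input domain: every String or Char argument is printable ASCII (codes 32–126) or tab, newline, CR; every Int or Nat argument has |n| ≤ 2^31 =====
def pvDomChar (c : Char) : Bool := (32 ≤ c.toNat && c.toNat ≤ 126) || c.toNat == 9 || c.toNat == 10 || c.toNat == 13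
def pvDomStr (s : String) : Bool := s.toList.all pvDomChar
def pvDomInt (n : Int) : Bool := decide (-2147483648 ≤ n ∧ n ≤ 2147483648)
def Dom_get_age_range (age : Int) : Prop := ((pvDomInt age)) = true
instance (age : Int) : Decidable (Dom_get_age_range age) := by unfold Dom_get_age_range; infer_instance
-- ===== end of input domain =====

-- B replaces A's linear scan over range(18,80,3) with a closed-form bucket computation (simpler).


-- ===== PORT A =====
-- the for-loop with early return: first matching bucket, else none
def pvLoopA (age : Int) : List Int → Option String
  | [] => none
  | s :: rest =>
    if s ≤ age ∧ age ≤ s + 2 then some (PySem.Int.toStr s ++ "-" ++ PySem.Int.toStr (s + 2))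
    else pvLoopA age rest

def get_age_range (age : Int) : String :=
  if age < 18 then "Below 18"
  else (pvLoopA age (PySem.List.pyRange 18 80 3)).getD "80+"

-- ===== PORT B =====
def get_age_range_alt (age : Int) : String :=
  if age < 18 then "Below 18"
  else if age > 80 then "80+"
  else
    let start := 18 + (PySem.Int.floordiv (age - 18) 3) * 3
    PySem.Int.toStr start ++ "-" ++ PySem.Int.toStr (start + 2)

-- ===== PRECONDITION & SPEC =====
def Spec_get_age_range (age : Int) (out : String) : Prop := out = get_age_range_alt age
instance (age : Int) (out : String) : Decidable (Spec_get_age_range age out) := by unfold Spec_get_age_range; infer_instance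

-- ===== CLAIM (what is proved, stated in full; the proofs are below) =====
def Claim_equal_get_age_range : Prop := ∀ (age : Int), Dom_get_age_range age → Spec_get_age_range age (get_age_range age)

-- ===== LEMMAS AND PROOFS =====
theorem pvLoopA_none (age : Int) (L : List Int) (h : ∀ s ∈ L, s + 2 < age) :
    pvLoopA age L = none := by
  induction L with
  | nil => rfl
  | cons s rest ih =>
    have hs := h s (List.mem_cons_self ..)
    simp only [pvLoopA, if_neg (by omega : ¬(s ≤ age ∧ age ≤ s + 2))]
    exact ih fun t ht => h t (List.mem_cons_of_mem _ ht)

theorem pvRange_lit : PySem.List.pyRange 18 80 3 =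
    [18, 21, 24, 27, 30, 33, 36, 39, 42, 45, 48, 51, 54, 57, 60, 63, 66, 69, 72, 75, 78] := by
  decide

-- ===== VERDICT (by name: the statement is the Claim_ definition above) =====
theorem get_age_range_spec : Claim_equal_get_age_range := by
  intro age _
  unfold Spec_get_age_range get_age_range get_age_range_alt
  by_cases h1 : age < 18
  · simp [h1]
  · by_cases h2 : age > 80
    · have : pvLoopA age (PySem.List.pyRange 18 80 3) = none := by
        apply pvLoopA_none
        rw [pvRange_lit]
        intro s hs
        simp only [List.mem_cons, List.not_mem_nil, or_false] at hs
        omega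
      simp [h1, h2, this]
    · have hlo : 18 ≤ age := by omega
      have hhi : age ≤ 80 := by omega
      simp only [if_neg h1, if_neg h2]
      interval_cases age <;> rfl
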